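-- pv_equiv track=rewrite | github.com/savoirfairelinux/jami-daemon | bin/jni/JavaJNI2CJNI_Load.py | type_to_signature
-- ===== SOURCE A (Python) =====
-- def type_to_signature(itype):
-- 	if len(itype) > 2:
-- 		if itype[-2:] == '[]':
-- 			return "[%s" % type_to_signature(itype[:-2])
-- 	if itype == "int":
-- 		return "I"
-- 	if itype == "long":
-- 		return "J"
-- 	if itype == "void":
-- 		return "V"
-- 	if itype == "boolean":
-- 		return "Z"
-- 	if itype == "byte":
-- 		return "B"
-- 	if itype == "char":
-- 		return "C"
-- 	if itype == "short":
-- 		return "S"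
-- 	if itype == "float":
-- 		return "F"
-- 	if itype == "double":
-- 		return "D"
-- 	if itype == "String":
-- 		return "Ljava/lang/String;"
-- 	if itype == "Object" or itype == "java.lang.Object":
-- 		return "Ljava/lang/Object;"
-- 	return "Lnet/jami/daemon/%s;" % itype.replace('.', '$')
-- ===== SOURCE B (Python) =====
-- _JNI = {
--     'int': 'I', 'long': 'J', 'void': 'V', 'boolean': 'Z', 'byte': 'B',
--     'char': 'C', 'short': 'S', 'float': 'F', 'double': 'D',
--     'String': 'Ljava/lang/String;',
--     'Object': 'Ljava/lang/Object;', 'java.lang.Object': 'Ljava/lang/Object;',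
-- }
--
-- def type_to_signature(itype):
--     count = 0
--     cur = itype
--     while len(cur) > 2 and cur.endswith('[]'):
--         count += 1
--         cur = cur[:-2]
--     return '[' * count + _JNI.get(cur, 'Lnet/jami/daemon/%s;' % cur.replace('.', '$'))
-- ===== Notes on version B (the rewrite author's own statement) =====
-- stated objective: simpler
-- what changed: Replaces the tail recursion over '[]' suffixes with an explicit counting loop and the 12-way if/elif comparison chain with a single dict lookup with a computed default.
import Mathlib
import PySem

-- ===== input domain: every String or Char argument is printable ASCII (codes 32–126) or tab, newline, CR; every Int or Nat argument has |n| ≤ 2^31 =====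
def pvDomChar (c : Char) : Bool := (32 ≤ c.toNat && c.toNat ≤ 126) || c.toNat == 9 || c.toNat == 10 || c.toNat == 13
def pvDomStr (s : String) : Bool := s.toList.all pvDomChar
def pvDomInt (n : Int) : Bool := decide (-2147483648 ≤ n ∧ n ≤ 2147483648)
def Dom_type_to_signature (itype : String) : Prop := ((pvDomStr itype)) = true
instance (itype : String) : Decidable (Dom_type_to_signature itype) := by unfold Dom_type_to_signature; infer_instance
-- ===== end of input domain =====

-- B replaces A's tail recursion over '[]' suffixes with a counting loop and the if-chain with a dict lookup (objective: simpler).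

-- ===== PORT A =====
-- A's recursion, step for step, on the character list of the string.
def typeSigA (cs : List Char) : List Char :=
  if 2 < PySem.Chars.len cs ∧ PySem.Chars.slice cs (some (-2)) none = "[]".toList then
    '[' :: typeSigA (PySem.Chars.slice cs none (some (-2)))
  else if cs = "int".toList then "I".toList
  else if cs = "long".toList then "J".toList
  else if cs = "void".toList then "V".toList
  else if cs = "boolean".toList then "Z".toList
  else if cs = "byte".toList then "B".toList
  else if cs = "char".toList then "C".toList
  else if cs = "short".toList then "S".toList
  else if cs = "float".toList then "F".toList
  else if cs = "double".toList then "D".toList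
  else if cs = "String".toList then "Ljava/lang/String;".toList
  else if cs = "Object".toList ∨ cs = "java.lang.Object".toList then "Ljava/lang/Object;".toList
  else "Lnet/jami/daemon/".toList ++ PySem.Chars.replace cs ".".toList "$".toList ++ ";".toList
termination_by cs.length
decreasing_by
  rw [PySem.Chars.slice_eq_listSlice, PySem.List.slice_to_neg_ofNat cs 2 (by omega)]
  have := PySem.Chars.len_eq cs
  simp only [List.length_take]
  omega

def type_to_signature (itype : String) : String := String.ofList (typeSigA itype.toList)

-- ===== PORT B =====
-- the module-level _JNI dict of Source B
def jniTable : PySem.Dict (List Char) (List Char) :=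
  PySem.Dict.ofList
  [("int".toList, "I".toList), ("long".toList, "J".toList), ("void".toList, "V".toList),
   ("boolean".toList, "Z".toList), ("byte".toList, "B".toList), ("char".toList, "C".toList),
   ("short".toList, "S".toList), ("float".toList, "F".toList), ("double".toList, "D".toList),
   ("String".toList, "Ljava/lang/String;".toList),
   ("Object".toList, "Ljava/lang/Object;".toList),
   ("java.lang.Object".toList, "Ljava/lang/Object;".toList)]

-- the while loop of Source B: strip trailing '[]', counting dimensions
def stripDims (cur : List Char) (count : Nat) : Nat × List Char :=
  if 2 < PySem.Chars.len cur ∧ PySem.Chars.endswith cur "[]".toList then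
    stripDims (PySem.Chars.slice cur none (some (-2))) (count + 1)
  else (count, cur)
termination_by cur.length
decreasing_by
  rw [PySem.Chars.slice_eq_listSlice, PySem.List.slice_to_neg_ofNat cur 2 (by omega)]
  have := PySem.Chars.len_eq cur
  simp only [List.length_take]
  omega

def typeSigB (cs : List Char) : List Char :=
  let r := stripDims cs 0
  List.replicate r.1 '[' ++
    PySem.Dict.getD jniTable r.2
      ("Lnet/jami/daemon/".toList ++ PySem.Chars.replace r.2 ".".toList "$".toList ++ ";".toList)

def type_to_signature_alt (itype : String) : String := String.ofList (typeSigB itype.toList)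

-- ===== PRECONDITION & SPEC =====
def Spec_type_to_signature (itype : String) (out : String) : Prop := out = type_to_signature_alt itype
instance (itype : String) (out : String) : Decidable (Spec_type_to_signature itype out) := by unfold Spec_type_to_signature; infer_instance

-- ===== CLAIM (what is proved, stated in full; the proofs are below) =====
def Claim_equal_type_to_signature : Prop := ∀ (itype : String), Dom_type_to_signature itype → Spec_type_to_signature itype (type_to_signature itype)

-- ===== LEMMAS AND PROOFS =====

-- the two loop guards agree: xs[-2:] == '[]' iff xs.endswith('[]'), given len > 2
lemma guard_iff (cs : List Char) (_h : 2 < PySem.Chars.len cs) :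
    PySem.Chars.slice cs (some (-2)) none = "[]".toList ↔
      PySem.Chars.endswith cs "[]".toList = true := by
  have hlen := PySem.Chars.len_eq cs
  rw [PySem.Chars.endswith_iff, PySem.Chars.slice_eq_listSlice,
      PySem.List.slice_from_neg_ofNat cs 2 (by omega), List.suffix_iff_eq_drop,
      show ("[]".toList).length = 2 from rfl]
  exact eq_comm

-- the dict lookup of B computes A's comparison chain on guard-false inputs
lemma lookup_eq_chain (cs : List Char)
    (hg : ¬ (2 < PySem.Chars.len cs ∧ PySem.Chars.slice cs (some (-2)) none = "[]".toList)) :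
    PySem.Dict.getD jniTable cs
      ("Lnet/jami/daemon/".toList ++ PySem.Chars.replace cs ".".toList "$".toList ++ ";".toList)
      = typeSigA cs := by
  rw [typeSigA.eq_def]
  simp only [hg, if_false]
  by_cases h1 : cs = "int".toList
  · subst h1; decide
  by_cases h2 : cs = "long".toList
  · subst h2; decide
  by_cases h3 : cs = "void".toList
  · subst h3; decide
  by_cases h4 : cs = "boolean".toList
  · subst h4; decide
  by_cases h5 : cs = "byte".toList
  · subst h5; decide
  by_cases h6 : cs = "char".toList
  · subst h6; decide
  by_cases h7 : cs = "short".toList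
  · subst h7; decide
  by_cases h8 : cs = "float".toList
  · subst h8; decide
  by_cases h9 : cs = "double".toList
  · subst h9; decide
  by_cases h10 : cs = "String".toList
  · subst h10; decide
  by_cases h11 : cs = "Object".toList
  · subst h11; decide
  by_cases h12 : cs = "java.lang.Object".toList
  · subst h12; decide
  have htab : jniTable = (⟨[("int".toList, "I".toList), ("long".toList, "J".toList),
      ("void".toList, "V".toList), ("boolean".toList, "Z".toList), ("byte".toList, "B".toList),
      ("char".toList, "C".toList), ("short".toList, "S".toList), ("float".toList, "F".toList),
      ("double".toList, "D".toList), ("String".toList, "Ljava/lang/String;".toList),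
      ("Object".toList, "Ljava/lang/Object;".toList),
      ("java.lang.Object".toList, "Ljava/lang/Object;".toList)]⟩ :
      PySem.Dict (List Char) (List Char)) := by decide
  rw [htab]
  simp only [PySem.Dict.getD, PySem.Dict.get?_mk_cons,
    beq_eq_false_iff_ne.mpr (Ne.symm h1), beq_eq_false_iff_ne.mpr (Ne.symm h2),
    beq_eq_false_iff_ne.mpr (Ne.symm h3), beq_eq_false_iff_ne.mpr (Ne.symm h4),
    beq_eq_false_iff_ne.mpr (Ne.symm h5), beq_eq_false_iff_ne.mpr (Ne.symm h6),
    beq_eq_false_iff_ne.mpr (Ne.symm h7), beq_eq_false_iff_ne.mpr (Ne.symm h8),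
    beq_eq_false_iff_ne.mpr (Ne.symm h9), beq_eq_false_iff_ne.mpr (Ne.symm h10),
    beq_eq_false_iff_ne.mpr (Ne.symm h11), beq_eq_false_iff_ne.mpr (Ne.symm h12),
    if_false, Bool.false_eq_true]
  simp only [PySem.Dict.get?, List.find?_nil, Option.map_none, Option.getD_none]
  split_ifs <;> simp_all

-- loop invariant: B's loop+lookup computes '[' * n prepended to A's recursion
lemma strip_inv (cs : List Char) (n : Nat) :
    (let r := stripDims cs n
     List.replicate r.1 '[' ++
       PySem.Dict.getD jniTable r.2
         ("Lnet/jami/daemon/".toList ++ PySem.Chars.replace r.2 ".".toList "$".toList ++ ";".toList))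
      = List.replicate n '[' ++ typeSigA cs := by
  induction cs, n using stripDims.induct with
  | case1 cs count hg ih =>
    have hg' : 2 < PySem.Chars.len cs ∧
        PySem.Chars.slice cs (some (-2)) none = "[]".toList :=
      ⟨hg.1, (guard_iff cs hg.1).2 hg.2⟩
    rw [stripDims.eq_def, if_pos hg, typeSigA.eq_def, if_pos hg']
    rw [ih]
    simp [List.replicate_succ']
  | case2 cs count hg =>
    rw [stripDims.eq_def, if_neg hg]
    have hg' : ¬ (2 < PySem.Chars.len cs ∧
        PySem.Chars.slice cs (some (-2)) none = "[]".toList) := by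
      intro ⟨ha, hb⟩; exact hg ⟨ha, (guard_iff cs ha).1 hb⟩
    simp only
    rw [lookup_eq_chain cs hg']

lemma typeSig_eq (cs : List Char) : typeSigA cs = typeSigB cs := by
  have := strip_inv cs 0
  simp only [List.replicate_zero, List.nil_append] at this
  rw [typeSigB]
  exact this.symm

-- ===== VERDICT (by name: the statement is the Claim_ definition above) =====
theorem type_to_signature_spec : Claim_equal_type_to_signature := by
  intro itype _
  unfold Spec_type_to_signature type_to_signature type_to_signature_alt
  rw [typeSig_eq]
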